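-- pv_equiv track=rewrite | github.com/kabads/advent-of-code-2024 | day0701.py | is_valid_equation
-- ===== SOURCE A (Python) =====
-- from itertools import product
--
-- def is_valid_equation(target, numbers):
--     for operators in product(['+', '*'], repeat=len(numbers)-1):
--         value = numbers[0]
--         for i, op in enumerate(operators):
--             if op == '+':
--                 value += numbers[i+1]
--             else:  # op == '*'
--                 value *= numbers[i+1]
--             if value > target:  # Early exit if we exceed target
--                 break
--         if value == target:
--             return True
--     return False
-- ===== SOURCE B (Python) =====
-- def is_valid_equation(target, numbers):
--     reachable = {numbers[0]}
--     for x in numbers[1:]: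
--         nxt = set()
--         for v in reachable:
--             for w in (v + x, v * x):
--                 if w <= target:
--                     nxt.add(w)
--         reachable = nxt
--     return target in reachable
-- ===== Notes on version B (the rewrite author's own statement) =====
-- stated objective: alternative
-- what changed: Replaced the enumeration of all 2^(n-1) operator tuples with a forward DP that carries the set of reachable partial values, discarding values above target exactly where A's early-exit break discards a tuple; A raises (ValueError/IndexError) on an empty numbers list, so Pre_ requires numbers nonempty (B raises there too).
import Mathlib
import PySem

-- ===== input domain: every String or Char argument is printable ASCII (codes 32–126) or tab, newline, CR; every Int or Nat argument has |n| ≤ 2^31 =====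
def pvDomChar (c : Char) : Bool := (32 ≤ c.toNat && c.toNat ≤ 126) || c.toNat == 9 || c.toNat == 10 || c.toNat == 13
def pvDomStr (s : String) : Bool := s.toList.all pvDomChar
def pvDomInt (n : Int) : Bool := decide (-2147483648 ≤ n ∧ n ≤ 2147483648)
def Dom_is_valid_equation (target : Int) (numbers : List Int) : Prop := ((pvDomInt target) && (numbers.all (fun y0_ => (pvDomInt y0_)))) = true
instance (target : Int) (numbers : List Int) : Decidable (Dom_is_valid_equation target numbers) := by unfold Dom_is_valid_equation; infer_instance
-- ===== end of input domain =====

-- B replaces A's enumeration of all 2^(n-1) operator tuples with a forward DP over the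
-- set of reachable partial values kept ≤ target (objective: alternative algorithm).


-- ===== PORT A =====
-- product(['+','*'], repeat=k), tuples in itertools order (first position varies slowest)
def pvProd : Nat → List (List Char)
  | 0 => [[]]
  | k + 1 => (['+', '*'] : List Char).flatMap (fun c => (pvProd k).map (fun t => c :: t))

-- A's inner loop: apply the operators left to right, breaking as soon as value > target
def pvRunOps (target value : Int) (ops : List Char) (rest : List Int) : Int :=
  match ops, rest with
  | op :: ops', x :: rest' =>
    let v := if op = '+' then value + x else value * x
    if v > target then v else pvRunOps target v ops' rest'
  | _, _ => value

def is_valid_equation (target : Int) (numbers : List Int) : Bool :=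
  match numbers with
  | [] => false  -- unreachable under Pre_: Python A raises here
  | n0 :: rest =>
    (pvProd (numbers.length - 1)).any (fun ops => pvRunOps target n0 ops rest == target)

-- ===== PORT B =====
-- one DP step: from the set of reachable values, add v+x and v*x when ≤ target
def pvStep (target x : Int) (S : PySem.Set Int) : PySem.Set Int :=
  S.foldl (fun nxt v =>
    let nxt1 := if v + x ≤ target then PySem.Set.add nxt (v + x) else nxt
    if v * x ≤ target then PySem.Set.add nxt1 (v * x) else nxt1) PySem.Set.empty

def is_valid_equation_alt (target : Int) (numbers : List Int) : Bool :=
  match numbers with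
  | [] => false  -- unreachable under Pre_: Python B raises here
  | n0 :: rest =>
    let final := rest.foldl (fun S x => pvStep target x S) (PySem.Set.add PySem.Set.empty n0)
    PySem.Set.contains final target

-- ===== PRECONDITION & SPEC =====
-- Python A raises on numbers = [] (product(..., repeat=-1) is a ValueError), hence:
def Pre_is_valid_equation (target : Int) (numbers : List Int) : Prop := numbers ≠ []
instance (target : Int) (numbers : List Int) : Decidable (Pre_is_valid_equation target numbers) := by unfold Pre_is_valid_equation; infer_instance
def pvWitness_is_valid_equation : Int × List Int := (190, [10, 19])

def Spec_is_valid_equation (target : Int) (numbers : List Int) (out : Bool) : Prop := out = is_valid_equation_alt target numbers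
instance (target : Int) (numbers : List Int) (out : Bool) : Decidable (Spec_is_valid_equation target numbers out) := by unfold Spec_is_valid_equation; infer_instance

-- ===== CLAIM (what is proved, stated in full; the proofs are below) =====
def Claim_equal_is_valid_equation : Prop := ∀ (target : Int) (numbers : List Int), Dom_is_valid_equation target numbers → Pre_is_valid_equation target numbers → Spec_is_valid_equation target numbers (is_valid_equation target numbers)

-- ===== LEMMAS AND PROOFS =====

-- the common specification: target is reachable from v over rest, with every partial
-- value (after each operation) ≤ target, and the final value equal to target
def pvRA (target : Int) : Int → List Int → Prop
  | v, [] => v = target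
  | v, x :: r => (v + x ≤ target ∧ pvRA target (v + x) r) ∨ (v * x ≤ target ∧ pvRA target (v * x) r)

lemma pvProd_any (target : Int) : ∀ (rest : List Int) (v : Int),
    ((pvProd rest.length).any (fun ops => pvRunOps target v ops rest == target) = true)
      ↔ pvRA target v rest := by
  intro rest
  induction rest with
  | nil => intro v; simp [pvProd, pvRunOps, pvRA]
  | cons x r ih =>
    intro v
    show ((['+', '*'] : List Char).flatMap
        (fun c => (pvProd r.length).map (fun t => c :: t))).any
        (fun ops => pvRunOps target v ops (x :: r) == target) = true ↔ _
    rw [show pvRA target v (x :: r)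
        = ((v + x ≤ target ∧ pvRA target (v + x) r) ∨ (v * x ≤ target ∧ pvRA target (v * x) r))
        from rfl]
    have hplus : (fun t => pvRunOps target v ('+' :: t) (x :: r) == target)
        = (fun t : List Char =>
            (if v + x > target then v + x else pvRunOps target (v + x) t r) == target) := by
      funext t; simp [pvRunOps]
    have hstar : (fun t => pvRunOps target v ('*' :: t) (x :: r) == target)
        = (fun t : List Char =>
            (if v * x > target then v * x else pvRunOps target (v * x) t r) == target) := by
      funext t; simp [pvRunOps]
    simp only [List.flatMap_cons, List.flatMap_nil, List.append_nil, List.any_append,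
      List.any_map, Function.comp_def, Bool.or_eq_true]
    rw [hplus, hstar]
    by_cases h1 : v + x > target <;> by_cases h2 : v * x > target
    · simp only [if_pos h1, if_pos h2, List.any_eq_true, beq_iff_eq]
      constructor
      · rintro (⟨t, _, h⟩ | ⟨t, _, h⟩)
        · exact absurd h (ne_of_gt h1)
        · exact absurd h (ne_of_gt h2)
      · rintro (⟨hle, _⟩ | ⟨hle, _⟩)
        · exact absurd hle (not_le.mpr h1)
        · exact absurd hle (not_le.mpr h2)
    · have hle2 : v * x ≤ target := not_lt.mp h2
      simp only [if_pos h1, if_neg h2, ih,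
        show ((v + x : Int) == target) = false from beq_eq_false_iff_ne.mpr (ne_of_gt h1),
        List.any_eq_true]
      constructor
      · rintro (⟨t, _, h⟩ | h)
        · exact absurd h (by simp)
        · exact Or.inr ⟨hle2, h⟩
      · rintro (⟨hle, _⟩ | ⟨_, h⟩)
        · exact absurd hle (not_le.mpr h1)
        · exact Or.inr h
    · have hle1 : v + x ≤ target := not_lt.mp h1
      simp only [if_neg h1, if_pos h2, ih,
        show ((v * x : Int) == target) = false from beq_eq_false_iff_ne.mpr (ne_of_gt h2),
        List.any_eq_true]
      constructor
      · rintro (h | ⟨t, _, h⟩)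
        · exact Or.inl ⟨hle1, h⟩
        · exact absurd h (by simp)
      · rintro (⟨_, h⟩ | ⟨hle, _⟩)
        · exact Or.inl h
        · exact absurd hle (not_le.mpr h2)
    · have hle1 : v + x ≤ target := not_lt.mp h1
      have hle2 : v * x ≤ target := not_lt.mp h2
      simp only [if_neg h1, if_neg h2, ih]
      constructor
      · rintro (h | h)
        · exact Or.inl ⟨hle1, h⟩
        · exact Or.inr ⟨hle2, h⟩
      · rintro (⟨_, h⟩ | ⟨_, h⟩)
        · exact Or.inl h
        · exact Or.inr h

lemma mem_pvStep_foldl (target x t : Int) : ∀ (L : List Int) (acc : PySem.Set Int),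
    t ∈ L.foldl (fun nxt v =>
        let nxt1 := if v + x ≤ target then PySem.Set.add nxt (v + x) else nxt
        if v * x ≤ target then PySem.Set.add nxt1 (v * x) else nxt1) acc
      ↔ t ∈ acc ∨ ∃ v ∈ L, (t = v + x ∨ t = v * x) ∧ t ≤ target := by
  have hone : ∀ (acc : PySem.Set Int) (v : Int),
      t ∈ (let nxt1 := if v + x ≤ target then PySem.Set.add acc (v + x) else acc
           if v * x ≤ target then PySem.Set.add nxt1 (v * x) else nxt1)
        ↔ t ∈ acc ∨ ((t = v + x ∨ t = v * x) ∧ t ≤ target) := by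
    intro acc v
    by_cases hA : v + x ≤ target <;> by_cases hM : v * x ≤ target <;>
      simp only [hA, hM, if_true, if_false, PySem.Set.mem_add] <;>
      constructor <;> intro h
    · rcases h with (h | rfl) | rfl
      · exact Or.inl h
      · exact Or.inr ⟨Or.inl rfl, hA⟩
      · exact Or.inr ⟨Or.inr rfl, hM⟩
    · rcases h with h | ⟨rfl | rfl, _⟩
      · exact Or.inl (Or.inl h)
      · exact Or.inl (Or.inr rfl)
      · exact Or.inr rfl
    · rcases h with h | rfl
      · exact Or.inl h
      · exact Or.inr ⟨Or.inl rfl, hA⟩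
    · rcases h with h | ⟨rfl | rfl, hle⟩
      · exact Or.inl h
      · exact Or.inr rfl
      · exact absurd hle hM
    · rcases h with h | rfl
      · exact Or.inl h
      · exact Or.inr ⟨Or.inr rfl, hM⟩
    · rcases h with h | ⟨rfl | rfl, hle⟩
      · exact Or.inl h
      · exact absurd hle hA
      · exact Or.inr rfl
    · exact Or.inl h
    · rcases h with h | ⟨rfl | rfl, hle⟩
      · exact h
      · exact absurd hle hA
      · exact absurd hle hM
  intro L
  induction L with
  | nil => intro acc; simp
  | cons v L ih =>
    intro acc
    rw [List.foldl_cons, ih, hone]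
    simp only [List.mem_cons]
    constructor
    · rintro ((h | h) | ⟨w, hw, hc⟩)
      · exact Or.inl h
      · exact Or.inr ⟨v, Or.inl rfl, h⟩
      · exact Or.inr ⟨w, Or.inr hw, hc⟩
    · rintro (h | ⟨w, rfl | hw, hc⟩)
      · exact Or.inl (Or.inl h)
      · exact Or.inl (Or.inr hc)
      · exact Or.inr ⟨w, hw, hc⟩

lemma mem_pvStep (target x t : Int) (S : PySem.Set Int) :
    t ∈ pvStep target x S ↔ ∃ v ∈ S, (t = v + x ∨ t = v * x) ∧ t ≤ target := by
  unfold pvStep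
  rw [mem_pvStep_foldl]
  simp [PySem.Set.empty]

lemma mem_foldl_pvStep (target : Int) : ∀ (rest : List Int) (S : PySem.Set Int),
    (target ∈ rest.foldl (fun S x => pvStep target x S) S) ↔ ∃ v ∈ S, pvRA target v rest := by
  intro rest
  induction rest with
  | nil => intro S; simp [pvRA, eq_comm]
  | cons x r ih =>
    intro S
    rw [List.foldl_cons, ih]
    constructor
    · rintro ⟨w, hw, hra⟩
      rw [mem_pvStep] at hw
      obtain ⟨v, hv, hcase, hle⟩ := hw
      refine ⟨v, hv, ?_⟩
      rcases hcase with rfl | rfl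
      · exact Or.inl ⟨hle, hra⟩
      · exact Or.inr ⟨hle, hra⟩
    · rintro ⟨v, hv, (⟨hle, hra⟩ | ⟨hle, hra⟩)⟩
      · exact ⟨v + x, (mem_pvStep ..).mpr ⟨v, hv, Or.inl rfl, hle⟩, hra⟩
      · exact ⟨v * x, (mem_pvStep ..).mpr ⟨v, hv, Or.inr rfl, hle⟩, hra⟩

-- ===== VERDICT (by name: the statement is the Claim_ definition above) =====
theorem is_valid_equation_spec : Claim_equal_is_valid_equation := by
  intro target numbers _ hpre
  unfold Spec_is_valid_equation
  match numbers with
  | [] => exact absurd rfl hpre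
  | n0 :: rest =>
    have hA : is_valid_equation target (n0 :: rest)
        = (pvProd rest.length).any (fun ops => pvRunOps target n0 ops rest == target) := rfl
    have hB : is_valid_equation_alt target (n0 :: rest)
        = PySem.Set.contains
            (rest.foldl (fun S x => pvStep target x S) (PySem.Set.add PySem.Set.empty n0))
            target := rfl
    rw [hA, hB, Bool.eq_iff_iff, pvProd_any, PySem.Set.contains_iff, mem_foldl_pvStep]
    constructor
    · intro h
      exact ⟨n0, by simp [PySem.Set.add, PySem.Set.empty], h⟩
    · rintro ⟨v, hv, h⟩
      have : v = n0 := by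
        simpa [PySem.Set.add, PySem.Set.empty] using hv
      exact this ▸ h
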